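-- pv_equiv track=rewrite | github.com/ZuzannaKonieczna/learning | phyton/konkurs/budowa.py | can_place_runways
-- ===== SOURCE A (Python) =====
-- def can_place_runways(n, m, airport, k):
--     for i in range(n):
--         for j in range(n - k + 1):
--             if all(airport[i][j + x] == '.' for x in range(k)):
--                 if m == 2:
--                     if i + 1 < n and all(airport[i + 1][j + x] == '.' for x in range(k)):
--                         return True
--                 else:
--                     return True
--     return False
-- ===== SOURCE B (Python) =====
-- def can_place_runways(n, m, airport, k):
--     if k > n:
--         return False
--     prev = None
--     for row in airport[:n]:
--         # run[j] = number of consecutive '.' starting at column j of this row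
--         run = [0] * (len(row) + 1)
--         for j in reversed(range(len(row))):
--             run[j] = run[j + 1] + 1 if row[j] == '.' else 0
--         window = run[:n - k + 1]
--         if m == 2:
--             if prev is not None and any(r >= k and p >= k for r, p in zip(window, prev)):
--                 return True
--             prev = window
--         else:
--             if any(r >= k for r in window):
--                 return True
--     return False
-- ===== Notes on version B (the rewrite author's own statement) =====
-- stated objective: faster
-- what changed: Instead of re-scanning k characters at every grid position (and again for the row below when m==2), B precomputes per row a run-length array of consecutive dots once (right-to-left DP), slices it to the valid window and checks each start in O(1), pairing consecutive rows via zip for m==2.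
-- outside the precondition, e.g. on can_place_runways(1, 1, [], 0): A returns True, B returns False; on can_place_runways(2, 2, ['.'], 0): A returns True, B returns False; on can_place_runways(2, 1, ['.', 'x.'], 1): A returns True, B returns True
import Mathlib
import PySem

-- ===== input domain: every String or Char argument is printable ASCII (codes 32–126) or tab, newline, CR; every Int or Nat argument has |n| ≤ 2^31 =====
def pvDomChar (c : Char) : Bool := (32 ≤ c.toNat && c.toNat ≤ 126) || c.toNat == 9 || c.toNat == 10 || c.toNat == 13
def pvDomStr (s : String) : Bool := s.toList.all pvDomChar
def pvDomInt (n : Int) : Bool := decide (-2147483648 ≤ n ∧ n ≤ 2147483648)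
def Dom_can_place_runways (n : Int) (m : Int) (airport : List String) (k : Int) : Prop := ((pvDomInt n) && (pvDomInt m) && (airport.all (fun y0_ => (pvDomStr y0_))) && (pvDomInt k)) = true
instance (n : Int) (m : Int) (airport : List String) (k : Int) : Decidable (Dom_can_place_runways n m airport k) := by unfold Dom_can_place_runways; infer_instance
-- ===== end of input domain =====

-- B replaces A's per-position k-character rescans by per-row run-length arrays of consecutive
-- dots (computed once per row, windows compared via zip) with O(1) window checks; equivalence
-- proved on Pre_ (k ≥ 1; A's vacuous k ≤ 0 behaviour is excluded).


-- ===== PORT A =====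
-- Python's loops return as soon as a window fits, so each loop is ported as an early-exit
-- recursion over its counter (range(...) is never materialized, matching Python's laziness).
-- all(airport[i][j + x] == '.' for x in range(k)), from counter x: the Option bind is `none`
-- exactly where Python raises IndexError (never reached inside Pre_ when A returns), and the
-- == test is then False.
def pvDotsAux (airport : List String) (i j k x : Int) : Bool :=
  if x < k then
    (((PySem.List.pyGet? airport i).bind (fun row => PySem.Str.pyGet? row (j + x))) == some '.')
      && pvDotsAux airport i j k (x + 1)
  else true
termination_by (k - x).toNat
decreasing_by omega

def pvDotsA (airport : List String) (i j k : Int) : Bool :=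
  pvDotsAux airport i j k 0

-- for j in range(n - k + 1): ... (returns True as soon as the body does)
def pvJLoop (n m k : Int) (airport : List String) (i j : Int) : Bool :=
  if j < n - k + 1 then
    if pvDotsA airport i j k &&
        (if m == 2 then decide (i + 1 < n) && pvDotsA airport (i + 1) j k else true) then true
    else pvJLoop n m k airport i (j + 1)
  else false
termination_by (n - k + 1 - j).toNat
decreasing_by omega

-- for i in range(n): ...
def pvILoop (n m k : Int) (airport : List String) (i : Int) : Bool :=
  if i < n then
    if pvJLoop n m k airport i 0 then true
    else pvILoop n m k airport (i + 1)
  else false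
termination_by (n - i).toNat
decreasing_by omega

def can_place_runways (n : Int) (m : Int) (airport : List String) (k : Int) : Bool :=
  pvILoop n m k airport 0

-- ===== PORT B =====
-- run[j] = run[j+1] + 1 if row[j] == '.' else 0, built right-to-left over the whole row
def pvRuns : List Char → List Int
  | [] => [0]
  | c :: rest =>
    let r := pvRuns rest
    (if c == '.' then r.getD 0 0 + 1 else 0) :: r

-- window = run[:n - k + 1]
def pvWindow (row : String) (n k : Int) : List Int :=
  PySem.List.slice (pvRuns row.toList) none (some (n - k + 1))

-- the for-row loop with its threaded `prev` window
def pvAltGo (n m k : Int) : List String → Option (List Int) → Bool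
  | [], _ => false
  | row :: rest, prev =>
    let window := pvWindow row n k
    if m == 2 then
      if (match prev with
          | some p => (window.zip p).any (fun rp => decide (k ≤ rp.1) && decide (k ≤ rp.2))
          | none => false) then true
      else pvAltGo n m k rest (some window)
    else
      if window.any (fun r => decide (k ≤ r)) then true
      else pvAltGo n m k rest prev

def can_place_runways_alt (n : Int) (m : Int) (airport : List String) (k : Int) : Bool :=
  if k > n then false
  else pvAltGo n m k (PySem.List.slice airport none (some n)) none

-- ===== PRECONDITION & SPEC =====
-- Pre_ restricts to the natural domain: k > n (no window exists, neither program reads the grid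
-- and both return False), or n ≤ 0 with no effective rows (airport[:n] empty: again both return
-- False), or k ≥ 1 together with a consistent grid of at least n rows of length at least n. Excluded are k ≤ n with k ≤ 0, where A's all() is vacuously true without
-- ever reading the grid (A returns True even on an empty airport list — an accident of the
-- generator expression that B's grid-reading algorithm does not reproduce), and ill-shaped grids
-- with 1 ≤ k ≤ n, on which A raises IndexError mid-scan except when an earlier window happens to
-- fit (then B returns the same True, but the exact raising set is not closed-form, so all such
-- grids are excluded).
def Pre_can_place_runways (n : Int) (m : Int) (airport : List String) (k : Int) : Prop :=
  n < k ∨ (n ≤ 0 ∧ (n = 0 ∨ (airport.length : Int) + n ≤ 0)) ∨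
    (1 ≤ k ∧ n ≤ (airport.length : Int) ∧ ∀ s ∈ airport.take n.toNat, n ≤ PySem.Str.len s)
instance (n : Int) (m : Int) (airport : List String) (k : Int) : Decidable (Pre_can_place_runways n m airport k) := by unfold Pre_can_place_runways; infer_instance

def pvWitness_can_place_runways : Int × Int × List String × Int := (2, 2, ["..", ".x"], 2)

def Spec_can_place_runways (n : Int) (m : Int) (airport : List String) (k : Int) (out : Bool) : Prop := out = can_place_runways_alt n m airport k
instance (n : Int) (m : Int) (airport : List String) (k : Int) (out : Bool) : Decidable (Spec_can_place_runways n m airport k out) := by unfold Spec_can_place_runways; infer_instance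

-- ===== CLAIM (what is proved, stated in full; the proofs are below) =====
def Claim_equal_can_place_runways : Prop := ∀ (n : Int) (m : Int) (airport : List String) (k : Int), Dom_can_place_runways n m airport k → Pre_can_place_runways n m airport k → Spec_can_place_runways n m airport k (can_place_runways n m airport k)

-- ===== LEMMAS AND PROOFS =====

-- airport[:n] is empty when n = 0, or when n < 0 reaches back past the front of the list
theorem pvSliceEmpty {α : Type} (xs : List α) (n : Int) (h : n ≤ 0)
    (h2 : n = 0 ∨ (xs.length : Int) + n ≤ 0) : PySem.List.slice xs none (some n) = [] := by
  simp only [PySem.List.slice, PySem.List.clampIdx]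
  split_ifs with h1 h3
  · simp
  · have hz : ((xs.length : Int) + n).toNat = 0 := by omega
    simp [hz]
  · have hz : n = 0 := by omega
    simp [hz]

-- the early-exit loops equal their materialized range forms
theorem pvDotsAux_eq (airport : List String) (i j k x : Int) :
    pvDotsAux airport i j k x = (PySem.List.pyRange x k 1).all (fun t =>
      ((PySem.List.pyGet? airport i).bind (fun row => PySem.Str.pyGet? row (j + t))) == some '.') := by
  rw [pvDotsAux]
  split
  · rename_i h
    rw [PySem.List.pyRange_one_cons h, List.all_cons, pvDotsAux_eq airport i j k (x + 1)]
  · rename_i h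
    rw [PySem.List.pyRange_one_eq_nil (by omega)]
    simp
termination_by (k - x).toNat
decreasing_by omega

theorem pvDotsA_eq (airport : List String) (i j k : Int) :
    pvDotsA airport i j k = (PySem.List.pyRange 0 k 1).all (fun t =>
      ((PySem.List.pyGet? airport i).bind (fun row => PySem.Str.pyGet? row (j + t))) == some '.') :=
  pvDotsAux_eq airport i j k 0

theorem pvJLoop_eq (n m k : Int) (airport : List String) (i j : Int) :
    pvJLoop n m k airport i j = (PySem.List.pyRange j (n - k + 1) 1).any (fun j' =>
      pvDotsA airport i j' k &&
        (if m == 2 then decide (i + 1 < n) && pvDotsA airport (i + 1) j' k else true)) := by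
  rw [pvJLoop]
  split
  · rename_i h
    rw [PySem.List.pyRange_one_cons h, List.any_cons, pvJLoop_eq n m k airport i (j + 1)]
    by_cases hb : (pvDotsA airport i j k &&
        (if m == 2 then decide (i + 1 < n) && pvDotsA airport (i + 1) j k else true)) = true
    · rw [if_pos hb, hb]; simp
    · rw [if_neg hb]
      simp only [Bool.not_eq_true] at hb
      rw [hb]; simp
  · rename_i h
    rw [PySem.List.pyRange_one_eq_nil (by omega)]
    simp
termination_by (n - k + 1 - j).toNat
decreasing_by omega

theorem pvILoop_eq (n m k : Int) (airport : List String) (i : Int) :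
    pvILoop n m k airport i = (PySem.List.pyRange i n 1).any (fun i' =>
      pvJLoop n m k airport i' 0) := by
  rw [pvILoop]
  split
  · rename_i h
    rw [PySem.List.pyRange_one_cons h, List.any_cons, pvILoop_eq n m k airport (i + 1)]
    split
    · rename_i hb; rw [hb]; simp
    · rename_i hb; simp only [Bool.not_eq_true] at hb; rw [hb]; simp
  · rename_i h
    rw [PySem.List.pyRange_one_eq_nil (by omega)]
    simp
termination_by (n - i).toNat
decreasing_by omega

theorem can_place_runways_eq (n m k : Int) (airport : List String) :
    can_place_runways n m airport k = (PySem.List.pyRange 0 n 1).any (fun i =>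
      (PySem.List.pyRange 0 (n - k + 1) 1).any (fun j =>
        pvDotsA airport i j k &&
          (if m == 2 then decide (i + 1 < n) && pvDotsA airport (i + 1) j k else true))) := by
  rw [can_place_runways, pvILoop_eq]
  refine congrArg _ (funext fun i => ?_)
  rw [pvJLoop_eq]

-- length of consecutive '.' at the head of a character list
def pvRunlen : List Char → Nat
  | [] => 0
  | c :: t => if c == '.' then pvRunlen t + 1 else 0

theorem pvRunlen_le_length (cs : List Char) : pvRunlen cs ≤ cs.length := by
  induction cs with
  | nil => simp [pvRunlen]
  | cons c t ih =>
    simp only [pvRunlen, List.length_cons]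
    split <;> omega

theorem pvRuns_getD (cs : List Char) (j : Nat) :
    (pvRuns cs).getD j 0 = ((pvRunlen (cs.drop j) : Nat) : Int) := by
  induction cs generalizing j with
  | nil => cases j <;> simp [pvRuns, pvRunlen]
  | cons c t ih =>
    cases j with
    | zero =>
      have h0 := ih 0
      simp only [List.drop_zero] at h0
      simp only [pvRuns, List.drop_zero, pvRunlen, List.getD, List.getElem?_cons_zero,
        Option.getD_some]
      split
      · rw [show (pvRuns t)[0]?.getD 0 = (pvRuns t).getD 0 0 from rfl, h0]; push_cast; ring
      · simp
    | succ j' => simpa [pvRuns, List.getD] using ih j'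

theorem pvRunlen_ge (cs : List Char) (K : Nat) :
    K ≤ pvRunlen cs ↔ ∀ x < K, cs[x]? = some '.' := by
  induction cs generalizing K with
  | nil =>
    cases K with
    | zero => simp
    | succ K' =>
      simp only [pvRunlen, List.getElem?_nil]
      constructor
      · omega
      · intro h; exact absurd (h 0 (Nat.succ_pos _)) (by simp)
  | cons c t ih =>
    cases K with
    | zero => simp
    | succ K' =>
      by_cases hc : c = '.'
      · subst hc
        have hr : pvRunlen ('.' :: t) = pvRunlen t + 1 := by simp [pvRunlen]
        rw [hr]
        constructor
        · intro h x hx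
          cases x with
          | zero => simp
          | succ x' => simpa using (ih K').mp (by omega) x' (by omega)
        · intro h
          have hall : ∀ x < K', t[x]? = some '.' := fun x hx => by
            simpa using h (x + 1) (by omega)
          have := (ih K').mpr hall
          omega
      · have hr : pvRunlen (c :: t) = 0 := by
          simp [pvRunlen, hc]
        rw [hr]
        constructor
        · omega
        · intro h
          have h0 := h 0 (Nat.succ_pos _)
          simp at h0
          exact absurd h0 hc

theorem pvRuns_length (cs : List Char) : (pvRuns cs).length = cs.length + 1 := by
  induction cs with
  | nil => simp [pvRuns]
  | cons c t ih => simp [pvRuns, ih]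

theorem pvAnyIff {α : Type} (l : List α) (p : α → Bool) :
    l.any p = true ↔ ∃ j : Nat, ∃ h : j < l.length, p l[j] = true := by
  rw [List.any_eq_true]
  constructor
  · rintro ⟨x, hx, hp⟩
    obtain ⟨j, hj, hje⟩ := List.mem_iff_getElem.mp hx
    exact ⟨j, hj, by rw [hje]; exact hp⟩
  · rintro ⟨j, hj, hp⟩
    exact ⟨l[j], List.getElem_mem hj, hp⟩

-- element j of the window is the run length starting at column j
theorem pvWindow_getElem? (row : String) (n k : Int) (j : Nat) (hnk : 0 ≤ n - k + 1)
    (hj1 : (j : Int) < n - k + 1) (hj2 : j < row.toList.length + 1) :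
    (pvWindow row n k)[j]? = some ((pvRunlen (row.toList.drop j) : Nat) : Int) := by
  rw [pvWindow, PySem.List.slice_to _ hnk, List.getElem?_take, if_pos (by omega)]
  have hj' : j < (pvRuns row.toList).length := by rw [pvRuns_length]; omega
  rw [List.getElem?_eq_getElem hj', ← List.getD_eq_getElem (pvRuns row.toList) 0 hj', pvRuns_getD]

theorem pvWindow_length (row : String) (n k : Int) (hnk : 0 ≤ n - k + 1) :
    (pvWindow row n k).length = min (n - k + 1).toNat (row.toList.length + 1) := by
  rw [pvWindow, PySem.List.slice_to _ hnk, List.length_take, pvRuns_length]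

theorem pvWindow_getElem_val (row : String) (n k : Int) (j : Nat) (hnk : 0 ≤ n - k + 1)
    (hj : j < (pvWindow row n k).length) :
    (pvWindow row n k)[j] = ((pvRunlen (row.toList.drop j) : Nat) : Int) := by
  have hjl := hj
  rw [pvWindow_length row n k hnk] at hjl
  have h := pvWindow_getElem? row n k j hnk (by omega) (by omega)
  rw [List.getElem?_eq_getElem hj] at h
  exact Option.some.inj h

-- the single-window test as an existential over starting columns
theorem pvWindowAny_iff (row : String) (n k : Int) (hk : 1 ≤ k) (hnk : 0 ≤ n - k + 1) :
    (pvWindow row n k).any (fun r => decide (k ≤ r)) = true ↔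
      ∃ j : Nat, (j : Int) < n - k + 1 ∧ k.toNat ≤ pvRunlen (row.toList.drop j) := by
  rw [pvAnyIff]
  constructor
  · rintro ⟨j, hj, hp⟩
    rw [pvWindow_getElem_val row n k j hnk hj] at hp
    have hjl := hj
    rw [pvWindow_length row n k hnk] at hjl
    refine ⟨j, by omega, ?_⟩
    simp only [decide_eq_true_eq] at hp
    omega
  · rintro ⟨j, hj, hK⟩
    have hle := pvRunlen_le_length (row.toList.drop j)
    rw [List.length_drop] at hle
    have hj2 : j < (pvWindow row n k).length := by
      rw [pvWindow_length row n k hnk]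
      omega
    refine ⟨j, hj2, ?_⟩
    rw [pvWindow_getElem_val row n k j hnk hj2]
    simp only [decide_eq_true_eq]
    omega

-- the zipped double-window test as an existential over starting columns
theorem pvWindowZipAny_iff (rowq rowp : String) (n k : Int) (hk : 1 ≤ k) (hnk : 0 ≤ n - k + 1) :
    ((pvWindow rowq n k).zip (pvWindow rowp n k)).any
        (fun rp => decide (k ≤ rp.1) && decide (k ≤ rp.2)) = true ↔
      ∃ j : Nat, (j : Int) < n - k + 1 ∧
        k.toNat ≤ pvRunlen (rowq.toList.drop j) ∧ k.toNat ≤ pvRunlen (rowp.toList.drop j) := by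
  rw [pvAnyIff]
  constructor
  · rintro ⟨j, hj, hp⟩
    have hjq : j < (pvWindow rowq n k).length := by
      have := hj; rw [List.length_zip] at this; omega
    have hjp : j < (pvWindow rowp n k).length := by
      have := hj; rw [List.length_zip] at this; omega
    rw [List.getElem_zip] at hp
    simp only [Bool.and_eq_true, decide_eq_true_eq] at hp
    rw [pvWindow_getElem_val rowq n k j hnk hjq, pvWindow_getElem_val rowp n k j hnk hjp] at hp
    have hjl := hjq
    rw [pvWindow_length rowq n k hnk] at hjl
    exact ⟨j, by omega, by omega, by omega⟩
  · rintro ⟨j, hj, hKq, hKp⟩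
    have hleq := pvRunlen_le_length (rowq.toList.drop j)
    have hlep := pvRunlen_le_length (rowp.toList.drop j)
    rw [List.length_drop] at hleq hlep
    have hjq : j < (pvWindow rowq n k).length := by
      rw [pvWindow_length rowq n k hnk]; omega
    have hjp : j < (pvWindow rowp n k).length := by
      rw [pvWindow_length rowp n k hnk]; omega
    have hjz : j < ((pvWindow rowq n k).zip (pvWindow rowp n k)).length := by
      rw [List.length_zip]; omega
    refine ⟨j, hjz, ?_⟩
    rw [List.getElem_zip]
    simp only [Bool.and_eq_true, decide_eq_true_eq]
    rw [pvWindow_getElem_val rowq n k j hnk hjq, pvWindow_getElem_val rowp n k j hnk hjp]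
    constructor <;> omega

-- A's window scan at (i, j) as a run-length condition
theorem pvDotsA_iff (airport : List String) (i j k : Int) (hk : 1 ≤ k)
    (hi0 : 0 ≤ i) (hj0 : 0 ≤ j) :
    pvDotsA airport i j k = true ↔
      ∃ row : String, PySem.List.pyGet? airport i = some row ∧
        k.toNat ≤ pvRunlen (row.toList.drop j.toNat) := by
  cases hrow : PySem.List.pyGet? airport i with
  | none =>
    constructor
    · intro h
      rw [pvDotsA_eq, List.all_eq_true] at h
      have := h 0 (by simp only [PySem.List.mem_pyRange_one]; omega)
      rw [hrow] at this
      simp at this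
    · rintro ⟨row, hr, _⟩
      exact absurd hr (by simp)
  | some row =>
    rw [pvDotsA_eq, List.all_eq_true]
    constructor
    · intro h
      refine ⟨row, rfl, ?_⟩
      rw [pvRunlen_ge]
      intro x hx
      have hone := h ((x : Int)) (by simp only [PySem.List.mem_pyRange_one]; omega)
      rw [hrow] at hone
      simp only [Option.bind_some, beq_iff_eq] at hone
      rw [PySem.Str.pyGet?_eq] at hone
      rw [show PySem.Chars.pyGet? row.toList (j + x) = PySem.List.pyGet? row.toList (j + x) from rfl] at hone
      rw [PySem.List.pyGet?_of_nonneg _ (by omega)] at hone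
      rw [List.getElem?_drop]
      rw [show j.toNat + x = (j + (x : Int)).toNat by omega]
      exact hone
    · rintro ⟨row', hr', hK⟩
      have hrr : row = row' := Option.some.inj hr'
      subst hrr
      rw [pvRunlen_ge] at hK
      intro x hx
      simp only [PySem.List.mem_pyRange_one] at hx
      have hone := hK (x.toNat) (by omega)
      rw [List.getElem?_drop] at hone
      rw [hrow]
      simp only [Option.bind_some, beq_iff_eq]
      rw [PySem.Str.pyGet?_eq]
      rw [show PySem.Chars.pyGet? row.toList (j + x) = PySem.List.pyGet? row.toList (j + x) from rfl]
      rw [PySem.List.pyGet?_of_nonneg _ (by omega)]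
      rw [show (j + x).toNat = j.toNat + x.toNat by omega]
      exact hone

-- the m ≠ 2 loop: plain search, prev never consulted
theorem pvGo_ne2 (n m k : Int) (hm : (m == 2) = false) :
    ∀ (rows : List String) (prev : Option (List Int)),
      pvAltGo n m k rows prev = true ↔
        ∃ row ∈ rows, (pvWindow row n k).any (fun r => decide (k ≤ r)) = true := by
  intro rows
  induction rows with
  | nil => intro prev; simp [pvAltGo]
  | cons r rest ih =>
    intro prev
    simp only [pvAltGo, hm, Bool.false_eq_true, if_false]
    by_cases hfit : (pvWindow r n k).any (fun x => decide (k ≤ x)) = true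
    · rw [if_pos hfit]
      exact iff_of_true rfl ⟨r, List.mem_cons_self, hfit⟩
    · simp only [Bool.not_eq_true] at hfit
      simp only [hfit, Bool.false_eq_true, if_false]
      rw [ih prev]
      constructor
      · rintro ⟨row, hmem, hf⟩
        exact ⟨row, List.mem_cons_of_mem _ hmem, hf⟩
      · rintro ⟨row, hmem, hf⟩
        rcases List.mem_cons.mp hmem with h | h
        · subst h; rw [hfit] at hf; exact absurd hf (by simp)
        · exact ⟨row, h, hf⟩

-- the m = 2 loop with an explicit previous window
theorem pvGo2 (n m k : Int) (hm : (m == 2) = true) :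
    ∀ (rows : List String) (p : List Int),
      pvAltGo n m k rows (some p) = true ↔
        ((∃ r, rows[0]? = some r ∧
            ((pvWindow r n k).zip p).any (fun rp => decide (k ≤ rp.1) && decide (k ≤ rp.2)) = true) ∨
         ∃ i : Nat, ∃ r q, rows[i]? = some r ∧ rows[i + 1]? = some q ∧
            ((pvWindow q n k).zip (pvWindow r n k)).any
              (fun rp => decide (k ≤ rp.1) && decide (k ≤ rp.2)) = true) := by
  intro rows
  induction rows with
  | nil =>
    intro p
    simp [pvAltGo]
  | cons r rest ih =>
    intro p
    simp only [pvAltGo, hm, if_true]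
    by_cases hfit : ((pvWindow r n k).zip p).any (fun rp => decide (k ≤ rp.1) && decide (k ≤ rp.2)) = true
    · rw [if_pos hfit]
      simp only [true_iff]
      exact Or.inl ⟨r, by simp, hfit⟩
    · rw [if_neg hfit]
      rw [ih (pvWindow r n k)]
      constructor
      · rintro (⟨r0, h0, hf⟩ | ⟨i, r', q, h1, h2, hf⟩)
        · exact Or.inr ⟨0, r, r0, by simp, by simpa using h0, hf⟩
        · exact Or.inr ⟨i + 1, r', q, by simpa using h1, by simpa using h2, hf⟩
      · rintro (⟨r0, h0, hf⟩ | ⟨i, r', q, h1, h2, hf⟩)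
        · simp only [List.getElem?_cons_zero, Option.some_inj] at h0
          subst h0
          exact absurd hf hfit
        · cases i with
          | zero =>
            simp only [List.getElem?_cons_zero, Option.some_inj] at h1
            subst h1
            exact Or.inl ⟨q, by simpa using h2, hf⟩
          | succ i' =>
            exact Or.inr ⟨i', r', q, by simpa using h1, by simpa using h2, hf⟩

-- the m = 2 loop from its initial `prev = None`
theorem pvGoTop2 (n m k : Int) (hm : (m == 2) = true) (rows : List String) :
    pvAltGo n m k rows none = true ↔
      ∃ i : Nat, ∃ r q, rows[i]? = some r ∧ rows[i + 1]? = some q ∧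
        ((pvWindow q n k).zip (pvWindow r n k)).any
          (fun rp => decide (k ≤ rp.1) && decide (k ≤ rp.2)) = true := by
  cases rows with
  | nil => simp [pvAltGo]
  | cons r rest =>
    simp only [pvAltGo, hm, if_true, Bool.false_eq_true, if_false]
    rw [pvGo2 n m k hm rest (pvWindow r n k)]
    constructor
    · rintro (⟨r0, h0, hf⟩ | ⟨i, r', q, h1, h2, hf⟩)
      · exact ⟨0, r, r0, by simp, by simpa using h0, hf⟩
      · exact ⟨i + 1, r', q, by simpa using h1, by simpa using h2, hf⟩
    · rintro ⟨i, r', q, h1, h2, hf⟩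
      cases i with
      | zero =>
        simp only [List.getElem?_cons_zero, Option.some_inj] at h1
        subst h1
        exact Or.inl ⟨q, by simpa using h2, hf⟩
      | succ i' =>
        exact Or.inr ⟨i', r', q, by simpa using h1, by simpa using h2, hf⟩

theorem pvBoolExt {a b : Bool} (h : a = true ↔ b = true) : a = b := by
  cases a <;> cases b <;> simp_all

-- both sides are False when the window range is empty (k > n)
theorem pvMainBig (n m k : Int) (airport : List String) (hkn : n < k) :
    can_place_runways n m airport k = can_place_runways_alt n m airport k := by
  rw [can_place_runways_alt, if_pos (by omega)]
  rw [can_place_runways_eq]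
  rw [PySem.List.pyRange_one_eq_nil (show n - k + 1 ≤ 0 by omega)]
  simp

-- m = 2 case, k ≤ n
theorem pvMain2 (n m k : Int) (airport : List String)
    (hk : 1 ≤ k) (hkn : k ≤ n) (hm : (m == 2) = true) :
    can_place_runways n m airport k = can_place_runways_alt n m airport k := by
  apply pvBoolExt
  have hnk : (0 : Int) ≤ n - k + 1 := by omega
  have hA : can_place_runways n m airport k = true ↔
      ∃ i : Int, (0 ≤ i ∧ i < n) ∧ ∃ j : Int, (0 ≤ j ∧ j < n - k + 1) ∧
        pvDotsA airport i j k = true ∧ (i + 1 < n ∧ pvDotsA airport (i + 1) j k = true) := by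
    rw [can_place_runways_eq]
    simp [List.any_eq_true, PySem.List.mem_pyRange_one, hm, and_assoc]
  have hrows : PySem.List.slice airport none (some n) = airport.take n.toNat :=
    PySem.List.slice_to _ (by omega)
  have hB : can_place_runways_alt n m airport k = true ↔
      ∃ i : Nat, ∃ r q, (airport.take n.toNat)[i]? = some r ∧
        (airport.take n.toNat)[i + 1]? = some q ∧
        ((pvWindow q n k).zip (pvWindow r n k)).any
          (fun rp => decide (k ≤ rp.1) && decide (k ≤ rp.2)) = true := by
    rw [can_place_runways_alt, if_neg (by omega), hrows]
    exact pvGoTop2 n m k hm _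
  rw [hA, hB]
  constructor
  · rintro ⟨i, ⟨hi0, hin⟩, j, ⟨hj0, hjn⟩, hD1, hi1n, hD2⟩
    obtain ⟨r, hr, hKr⟩ := (pvDotsA_iff airport i j k hk hi0 hj0).mp hD1
    obtain ⟨q, hq, hKq⟩ := (pvDotsA_iff airport (i + 1) j k hk (by omega) hj0).mp hD2
    rw [PySem.List.pyGet?_of_nonneg _ (by omega)] at hr
    rw [PySem.List.pyGet?_of_nonneg _ (by omega)] at hq
    refine ⟨i.toNat, r, q, ?_, ?_, ?_⟩
    · rw [List.getElem?_take, if_pos (by omega)]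
      exact hr
    · rw [List.getElem?_take, if_pos (by omega)]
      rw [show i.toNat + 1 = (i + 1).toNat by omega]
      exact hq
    · rw [pvWindowZipAny_iff q r n k hk hnk]
      exact ⟨j.toNat, by omega, hKq, hKr⟩
  · rintro ⟨i, r, q, h1, h2, hf⟩
    rw [List.getElem?_take] at h1 h2
    by_cases hiN : i < n.toNat
    swap
    · rw [if_neg hiN] at h1; exact absurd h1 (by simp)
    by_cases hi1N : i + 1 < n.toNat
    swap
    · rw [if_neg hi1N] at h2; exact absurd h2 (by simp)
    rw [if_pos hiN] at h1
    rw [if_pos hi1N] at h2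
    obtain ⟨j, hj, hKq, hKr⟩ := (pvWindowZipAny_iff q r n k hk hnk).mp hf
    refine ⟨(i : Int), ⟨by omega, by omega⟩, (j : Int), ⟨by omega, hj⟩, ?_, by omega, ?_⟩
    · rw [pvDotsA_iff airport i j k hk (by omega) (by omega)]
      refine ⟨r, ?_, by simpa using hKr⟩
      rw [PySem.List.pyGet?_of_nonneg _ (by omega)]
      rw [show ((i : Int)).toNat = i by omega]
      exact h1
    · rw [pvDotsA_iff airport ((i : Int) + 1) j k hk (by omega) (by omega)]
      refine ⟨q, ?_, by simpa using hKq⟩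
      rw [PySem.List.pyGet?_of_nonneg _ (by omega)]
      rw [show ((i : Int) + 1).toNat = i + 1 by omega]
      exact h2

-- m ≠ 2 case, k ≤ n
theorem pvMainNe2 (n m k : Int) (airport : List String)
    (hk : 1 ≤ k) (hkn : k ≤ n) (hm : (m == 2) = false) :
    can_place_runways n m airport k = can_place_runways_alt n m airport k := by
  apply pvBoolExt
  have hnk : (0 : Int) ≤ n - k + 1 := by omega
  have hA : can_place_runways n m airport k = true ↔
      ∃ i : Int, (0 ≤ i ∧ i < n) ∧ ∃ j : Int, (0 ≤ j ∧ j < n - k + 1) ∧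
        pvDotsA airport i j k = true := by
    rw [can_place_runways_eq]
    simp [List.any_eq_true, PySem.List.mem_pyRange_one, hm, and_assoc]
  have hrows : PySem.List.slice airport none (some n) = airport.take n.toNat :=
    PySem.List.slice_to _ (by omega)
  have hB : can_place_runways_alt n m airport k = true ↔
      ∃ row ∈ airport.take n.toNat, (pvWindow row n k).any (fun r => decide (k ≤ r)) = true := by
    rw [can_place_runways_alt, if_neg (by omega), hrows]
    exact pvGo_ne2 n m k hm _ none
  rw [hA, hB]
  constructor
  · rintro ⟨i, ⟨hi0, hin⟩, j, ⟨hj0, hjn⟩, hD⟩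
    obtain ⟨r, hr, hKr⟩ := (pvDotsA_iff airport i j k hk hi0 hj0).mp hD
    rw [PySem.List.pyGet?_of_nonneg _ (by omega)] at hr
    have hmem : r ∈ airport.take n.toNat := by
      apply List.mem_of_getElem? (i := i.toNat)
      rw [List.getElem?_take, if_pos (by omega)]
      exact hr
    refine ⟨r, hmem, ?_⟩
    rw [pvWindowAny_iff r n k hk hnk]
    exact ⟨j.toNat, by omega, hKr⟩
  · rintro ⟨row, hmem, hfit⟩
    obtain ⟨i, hie⟩ := List.mem_iff_getElem?.mp hmem
    rw [List.getElem?_take] at hie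
    by_cases hiN : i < n.toNat
    swap
    · rw [if_neg hiN] at hie; exact absurd hie (by simp)
    rw [if_pos hiN] at hie
    obtain ⟨j, hj, hK⟩ := (pvWindowAny_iff row n k hk hnk).mp hfit
    refine ⟨(i : Int), ⟨by omega, by omega⟩, (j : Int), ⟨by omega, hj⟩, ?_⟩
    rw [pvDotsA_iff airport i j k hk (by omega) (by omega)]
    refine ⟨row, ?_, by simpa using hK⟩
    rw [PySem.List.pyGet?_of_nonneg _ (by omega)]
    rw [show ((i : Nat) : Int).toNat = i by omega]
    exact hie

-- ===== VERDICT (by name: the statement is the Claim_ definition above) =====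
theorem can_place_runways_spec : Claim_equal_can_place_runways := by
  intro n m airport k hdom hpre
  unfold Spec_can_place_runways
  by_cases hkn : k ≤ n
  · rcases hpre with h | ⟨hn0, hempty⟩ | ⟨hk, -⟩
    · exact absurd h (by omega)
    · have hA : can_place_runways n m airport k = false := by
        rw [can_place_runways, pvILoop, if_neg (by omega)]
      have hB : can_place_runways_alt n m airport k = false := by
        rw [can_place_runways_alt, if_neg (by omega)]
        rw [pvSliceEmpty airport n hn0 hempty]
        rfl
      rw [hA, hB]
    · by_cases hm : m = 2
      · exact pvMain2 n m k airport hk hkn (by simp [hm])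
      · exact pvMainNe2 n m k airport hk hkn (by simp [hm])
  · exact pvMainBig n m k airport (by omega)
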